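-- pv_equiv track=rewrite | github.com/kbrill11/lennys-podcast-transcripts | analyze_evolution_and_expertise.py | categorize_by_expertise
-- ===== SOURCE A (Python) =====
-- def categorize_by_expertise(expertise_areas: list[str]) -> str:
--     """Determine primary expertise category."""
--     if not expertise_areas:
--         return "general"
--
--     expertise_lower = [e.lower() for e in expertise_areas]
--
--     # Check for specific expertise patterns
--     if any("ai" in e or "machine learning" in e or "ml" in e for e in expertise_lower):
--         return "ai_ml"
--     if any("growth" in e for e in expertise_lower):
--         return "growth"
--     if any("engineer" in e or "technical" in e or "software" in e for e in expertise_lower):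
--         return "engineering"
--     if any("design" in e or "ux" in e for e in expertise_lower):
--         return "design"
--     if any("marketing" in e or "brand" in e for e in expertise_lower):
--         return "marketing"
--     if any("product" in e for e in expertise_lower):
--         return "product"
--     if any("leader" in e or "management" in e or "executive" in e for e in expertise_lower):
--         return "leadership"
--
--     return "general"
-- ===== SOURCE B (Python) =====
-- KEYWORDS = [
--     ("ai", "machine learning", "ml"),
--     ("growth",),
--     ("engineer", "technical", "software"),
--     ("design", "ux"),
--     ("marketing", "brand"),
--     ("product",),
--     ("leader", "management", "executive"),
-- ]
-- NAMES = ["ai_ml", "growth", "engineering", "design", "marketing", "product", "leadership", "general"]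
--
--
-- def _rank(e: str) -> int:
--     """Priority rank of one lowercased area: index of the first keyword group it matches, else 7."""
--     for i, kws in enumerate(KEYWORDS):
--         if any(k in e for k in kws):
--             return i
--     return len(KEYWORDS)
--
--
-- def categorize_by_expertise(expertise_areas: list[str]) -> str:
--     """Determine primary expertise category: rank every area, the minimum rank wins."""
--     best = min((_rank(a.lower()) for a in expertise_areas), default=len(KEYWORDS))
--     return NAMES[best]
-- ===== Notes on version B (the rewrite author's own statement) =====
-- stated objective: alternative
-- what changed: B is a map-reduce: each area is independently ranked (index of the first keyword group it matches, via one short-circuiting pass over the keyword table), the minimum rank over all areas is taken, and that single integer indexes the name table; A instead makes seven sequential whole-list any-scans with early returns and keeps no numeric state.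
import Mathlib
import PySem

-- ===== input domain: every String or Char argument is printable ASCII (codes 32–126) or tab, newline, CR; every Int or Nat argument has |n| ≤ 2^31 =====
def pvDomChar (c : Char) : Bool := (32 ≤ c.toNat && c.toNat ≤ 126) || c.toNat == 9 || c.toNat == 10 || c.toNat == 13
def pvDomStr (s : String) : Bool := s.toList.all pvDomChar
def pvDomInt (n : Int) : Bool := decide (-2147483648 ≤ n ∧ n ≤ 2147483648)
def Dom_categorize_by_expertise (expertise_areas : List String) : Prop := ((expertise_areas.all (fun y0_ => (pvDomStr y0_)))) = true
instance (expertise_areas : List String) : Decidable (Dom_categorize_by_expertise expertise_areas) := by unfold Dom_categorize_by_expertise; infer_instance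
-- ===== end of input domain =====

-- B is a map-reduce: each area gets a priority rank (index of the first keyword group it
-- matches, else 7), the minimum rank over the areas indexes a name table; A instead runs
-- seven sequential whole-list any-scans with early returns. Objective: alternative structure.

-- ===== PORT A =====
def categorize_by_expertise (expertise_areas : List String) : String :=
  if expertise_areas.isEmpty then "general"
  else
    let expertise_lower := expertise_areas.map PySem.Str.lower
    if expertise_lower.any (fun e => PySem.Str.isIn "ai" e || PySem.Str.isIn "machine learning" e || PySem.Str.isIn "ml" e) then "ai_ml"
    else if expertise_lower.any (fun e => PySem.Str.isIn "growth" e) then "growth"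
    else if expertise_lower.any (fun e => PySem.Str.isIn "engineer" e || PySem.Str.isIn "technical" e || PySem.Str.isIn "software" e) then "engineering"
    else if expertise_lower.any (fun e => PySem.Str.isIn "design" e || PySem.Str.isIn "ux" e) then "design"
    else if expertise_lower.any (fun e => PySem.Str.isIn "marketing" e || PySem.Str.isIn "brand" e) then "marketing"
    else if expertise_lower.any (fun e => PySem.Str.isIn "product" e) then "product"
    else if expertise_lower.any (fun e => PySem.Str.isIn "leader" e || PySem.Str.isIn "management" e || PySem.Str.isIn "executive" e) then "leadership"
    else "general"

-- ===== PORT B =====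
def pvKeywords : List (List String) :=
  [["ai", "machine learning", "ml"],
   ["growth"],
   ["engineer", "technical", "software"],
   ["design", "ux"],
   ["marketing", "brand"],
   ["product"],
   ["leader", "management", "executive"]]

def pvNames : List String :=
  ["ai_ml", "growth", "engineering", "design", "marketing", "product", "leadership", "general"]

-- Source B's _rank: the 'for i, kws in enumerate(KEYWORDS)' loop with early return, else len(KEYWORDS)
def pvRankAux (kws : List (List String)) (i : Nat) (e : String) : Nat :=
  match kws with
  | [] => i
  | k :: rest => if k.any (fun w => PySem.Str.isIn w e) then i else pvRankAux rest (i + 1) e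

def pvRank (e : String) : Nat := pvRankAux pvKeywords 0 e

def categorize_by_expertise_alt (expertise_areas : List String) : String :=
  -- min(ranks, default=len(KEYWORDS)): Python's min over a possibly empty iterable
  let best :=
    match expertise_areas.map (fun a => pvRank (PySem.Str.lower a)) with
    | [] => pvKeywords.length
    | r :: rest => rest.foldl min r
  pvNames.getD best "general"

-- ===== PRECONDITION & SPEC =====
def Spec_categorize_by_expertise (expertise_areas : List String) (out : String) : Prop := out = categorize_by_expertise_alt expertise_areas
instance (expertise_areas : List String) (out : String) : Decidable (Spec_categorize_by_expertise expertise_areas out) := by unfold Spec_categorize_by_expertise; infer_instance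

-- ===== CLAIM (what is proved, stated in full; the proofs are below) =====
def Claim_equal_categorize_by_expertise : Prop := ∀ (expertise_areas : List String), Dom_categorize_by_expertise expertise_areas → Spec_categorize_by_expertise expertise_areas (categorize_by_expertise expertise_areas)

-- ===== LEMMAS AND PROOFS =====

-- the seven per-area match conditions, in exactly A's shape
def pvC0 (e : String) : Bool := PySem.Str.isIn "ai" e || PySem.Str.isIn "machine learning" e || PySem.Str.isIn "ml" e
def pvC1 (e : String) : Bool := PySem.Str.isIn "growth" e
def pvC2 (e : String) : Bool := PySem.Str.isIn "engineer" e || PySem.Str.isIn "technical" e || PySem.Str.isIn "software" e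
def pvC3 (e : String) : Bool := PySem.Str.isIn "design" e || PySem.Str.isIn "ux" e
def pvC4 (e : String) : Bool := PySem.Str.isIn "marketing" e || PySem.Str.isIn "brand" e
def pvC5 (e : String) : Bool := PySem.Str.isIn "product" e
def pvC6 (e : String) : Bool := PySem.Str.isIn "leader" e || PySem.Str.isIn "management" e || PySem.Str.isIn "executive" e

theorem pv_rank_le_7 (e : String) : pvRank e ≤ 7 := by
  simp only [pvRank, pvKeywords, pvRankAux]
  split_ifs <;> omega

theorem pv_rank_le0 (e : String) : pvRank e ≤ 0 ↔ pvC0 e = true := by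
  simp only [pvRank, pvKeywords, pvRankAux, pvC0]
  split_ifs <;> simp_all [Bool.or_assoc]

theorem pv_rank_le1 (e : String) : pvRank e ≤ 1 ↔ (pvC0 e || pvC1 e) = true := by
  simp only [pvRank, pvKeywords, pvRankAux, pvC0, pvC1]
  split_ifs <;> simp_all [Bool.or_assoc] <;> tauto

theorem pv_rank_le2 (e : String) : pvRank e ≤ 2 ↔ (pvC0 e || pvC1 e || pvC2 e) = true := by
  simp only [pvRank, pvKeywords, pvRankAux, pvC0, pvC1, pvC2]
  split_ifs <;> simp_all [Bool.or_assoc] <;> tauto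

theorem pv_rank_le3 (e : String) : pvRank e ≤ 3 ↔ (pvC0 e || pvC1 e || pvC2 e || pvC3 e) = true := by
  simp only [pvRank, pvKeywords, pvRankAux, pvC0, pvC1, pvC2, pvC3]
  split_ifs <;> simp_all [Bool.or_assoc] <;> tauto

theorem pv_rank_le4 (e : String) : pvRank e ≤ 4 ↔ (pvC0 e || pvC1 e || pvC2 e || pvC3 e || pvC4 e) = true := by
  simp only [pvRank, pvKeywords, pvRankAux, pvC0, pvC1, pvC2, pvC3, pvC4]
  split_ifs <;> simp_all [Bool.or_assoc] <;> tauto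

theorem pv_rank_le5 (e : String) : pvRank e ≤ 5 ↔ (pvC0 e || pvC1 e || pvC2 e || pvC3 e || pvC4 e || pvC5 e) = true := by
  simp only [pvRank, pvKeywords, pvRankAux, pvC0, pvC1, pvC2, pvC3, pvC4, pvC5]
  split_ifs <;> simp_all [Bool.or_assoc] <;> tauto

theorem pv_rank_le6 (e : String) : pvRank e ≤ 6 ↔ (pvC0 e || pvC1 e || pvC2 e || pvC3 e || pvC4 e || pvC5 e || pvC6 e) = true := by
  simp only [pvRank, pvKeywords, pvRankAux, pvC0, pvC1, pvC2, pvC3, pvC4, pvC5, pvC6]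
  split_ifs <;> simp_all [Bool.or_assoc] <;> tauto

theorem pv_foldl_min_le (l : List Nat) (x c : Nat) :
    l.foldl min x ≤ c ↔ x ≤ c ∨ ∃ y ∈ l, y ≤ c := by
  induction l generalizing x with
  | nil => simp
  | cons a t ih =>
    rw [List.foldl_cons, ih]
    constructor
    · rintro (h | h)
      · rcases min_le_iff.mp h with h' | h'
        · exact Or.inl h'
        · exact Or.inr ⟨a, by simp, h'⟩
      · rcases h with ⟨y, hy, hyc⟩; exact Or.inr ⟨y, by simp [hy], hyc⟩
    · rintro (h | ⟨y, hy, hyc⟩)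
      · exact Or.inl (le_trans (Nat.min_le_left _ _) h)
      · rcases List.mem_cons.mp hy with rfl | hy'
        · exact Or.inl (le_trans (Nat.min_le_right _ _) hyc)
        · exact Or.inr ⟨y, hy', hyc⟩

-- the min of the ranks is ≤ c iff some area's rank is ≤ c
theorem pv_best_le (a : String) (rest : List String) (c : Nat) :
    ((rest.map (fun b => pvRank (PySem.Str.lower b))).foldl min (pvRank (PySem.Str.lower a)) ≤ c)
      ↔ ∃ b ∈ a :: rest, pvRank (PySem.Str.lower b) ≤ c := by
  rw [pv_foldl_min_le]
  aesop

-- ===== VERDICT (by name: the statement is the Claim_ definition above) =====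
theorem categorize_by_expertise_spec : Claim_equal_categorize_by_expertise := by
  intro xs _
  unfold Spec_categorize_by_expertise categorize_by_expertise categorize_by_expertise_alt
  match xs with
  | [] => rfl
  | a :: rest =>
    simp only [List.isEmpty_cons, Bool.false_eq_true, if_false, List.map_cons,
      show ∀ e, (PySem.Str.isIn "ai" e || PySem.Str.isIn "machine learning" e || PySem.Str.isIn "ml" e) = pvC0 e from fun _ => rfl,
      show ∀ e, (PySem.Str.isIn "growth" e) = pvC1 e from fun _ => rfl,
      show ∀ e, (PySem.Str.isIn "engineer" e || PySem.Str.isIn "technical" e || PySem.Str.isIn "software" e) = pvC2 e from fun _ => rfl,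
      show ∀ e, (PySem.Str.isIn "design" e || PySem.Str.isIn "ux" e) = pvC3 e from fun _ => rfl,
      show ∀ e, (PySem.Str.isIn "marketing" e || PySem.Str.isIn "brand" e) = pvC4 e from fun _ => rfl,
      show ∀ e, (PySem.Str.isIn "product" e) = pvC5 e from fun _ => rfl,
      show ∀ e, (PySem.Str.isIn "leader" e || PySem.Str.isIn "management" e || PySem.Str.isIn "executive" e) = pvC6 e from fun _ => rfl]
    have hany : ∀ (g : String → Bool),
        ((PySem.Str.lower a :: rest.map PySem.Str.lower).any g)
          = (a :: rest).any (fun b => g (PySem.Str.lower b)) := by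
      intro g; rw [← List.map_cons, List.any_map]; rfl
    simp only [hany]
    set m := (rest.map (fun b => pvRank (PySem.Str.lower b))).foldl min (pvRank (PySem.Str.lower a)) with hm
    have hm7 : m ≤ 7 := (pv_best_le a rest 7).mpr ⟨a, by simp, pv_rank_le_7 _⟩
    by_cases h0 : (a :: rest).any (fun b => pvC0 (PySem.Str.lower b)) = true
    · obtain ⟨b, hb, hd⟩ := List.any_eq_true.mp h0
      have hle : m ≤ 0 := (pv_best_le a rest 0).mpr ⟨b, hb, (pv_rank_le0 _).mpr hd⟩
      have hm0 : m = 0 := by omega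
      simp only [h0, hm0, if_true]
      rfl
    · rw [Bool.not_eq_true] at h0
      by_cases h1 : (a :: rest).any (fun b => pvC1 (PySem.Str.lower b)) = true
      · obtain ⟨b, hb, hd⟩ := List.any_eq_true.mp h1
        have hle : m ≤ 1 := (pv_best_le a rest 1).mpr ⟨b, hb, (pv_rank_le1 _).mpr (by simp [hd])⟩
        have hgt : ¬ m ≤ 0 := by
          intro hc
          obtain ⟨b', hb', hr⟩ := (pv_best_le a rest 0).mp hc
          have hD := (pv_rank_le0 _).mp hr
          have := List.any_eq_false.mp h0 b' hb'
          simp_all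
        have hmv : m = 1 := by omega
        simp only [h0, h1, hmv, Bool.false_eq_true, if_false, if_true]
        rfl
      · rw [Bool.not_eq_true] at h1
        by_cases h2 : (a :: rest).any (fun b => pvC2 (PySem.Str.lower b)) = true
        · obtain ⟨b, hb, hd⟩ := List.any_eq_true.mp h2
          have hle : m ≤ 2 := (pv_best_le a rest 2).mpr ⟨b, hb, (pv_rank_le2 _).mpr (by simp [hd])⟩
          have hgt : ¬ m ≤ 1 := by
            intro hc
            obtain ⟨b', hb', hr⟩ := (pv_best_le a rest 1).mp hc
            have hD := (pv_rank_le1 _).mp hr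
            have := List.any_eq_false.mp h0 b' hb'
            have := List.any_eq_false.mp h1 b' hb'
            simp_all
          have hmv : m = 2 := by omega
          simp only [h0, h1, h2, hmv, Bool.false_eq_true, if_false, if_true]
          rfl
        · rw [Bool.not_eq_true] at h2
          by_cases h3 : (a :: rest).any (fun b => pvC3 (PySem.Str.lower b)) = true
          · obtain ⟨b, hb, hd⟩ := List.any_eq_true.mp h3
            have hle : m ≤ 3 := (pv_best_le a rest 3).mpr ⟨b, hb, (pv_rank_le3 _).mpr (by simp [hd])⟩
            have hgt : ¬ m ≤ 2 := by
              intro hc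
              obtain ⟨b', hb', hr⟩ := (pv_best_le a rest 2).mp hc
              have hD := (pv_rank_le2 _).mp hr
              have := List.any_eq_false.mp h0 b' hb'
              have := List.any_eq_false.mp h1 b' hb'
              have := List.any_eq_false.mp h2 b' hb'
              simp_all
            have hmv : m = 3 := by omega
            simp only [h0, h1, h2, h3, hmv, Bool.false_eq_true, if_false, if_true]
            rfl
          · rw [Bool.not_eq_true] at h3
            by_cases h4 : (a :: rest).any (fun b => pvC4 (PySem.Str.lower b)) = true
            · obtain ⟨b, hb, hd⟩ := List.any_eq_true.mp h4
              have hle : m ≤ 4 := (pv_best_le a rest 4).mpr ⟨b, hb, (pv_rank_le4 _).mpr (by simp [hd])⟩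
              have hgt : ¬ m ≤ 3 := by
                intro hc
                obtain ⟨b', hb', hr⟩ := (pv_best_le a rest 3).mp hc
                have hD := (pv_rank_le3 _).mp hr
                have := List.any_eq_false.mp h0 b' hb'
                have := List.any_eq_false.mp h1 b' hb'
                have := List.any_eq_false.mp h2 b' hb'
                have := List.any_eq_false.mp h3 b' hb'
                simp_all
              have hmv : m = 4 := by omega
              simp only [h0, h1, h2, h3, h4, hmv, Bool.false_eq_true, if_false, if_true]
              rfl
            · rw [Bool.not_eq_true] at h4
              by_cases h5 : (a :: rest).any (fun b => pvC5 (PySem.Str.lower b)) = true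
              · obtain ⟨b, hb, hd⟩ := List.any_eq_true.mp h5
                have hle : m ≤ 5 := (pv_best_le a rest 5).mpr ⟨b, hb, (pv_rank_le5 _).mpr (by simp [hd])⟩
                have hgt : ¬ m ≤ 4 := by
                  intro hc
                  obtain ⟨b', hb', hr⟩ := (pv_best_le a rest 4).mp hc
                  have hD := (pv_rank_le4 _).mp hr
                  have := List.any_eq_false.mp h0 b' hb'
                  have := List.any_eq_false.mp h1 b' hb'
                  have := List.any_eq_false.mp h2 b' hb'
                  have := List.any_eq_false.mp h3 b' hb'
                  have := List.any_eq_false.mp h4 b' hb'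
                  simp_all
                have hmv : m = 5 := by omega
                simp only [h0, h1, h2, h3, h4, h5, hmv, Bool.false_eq_true, if_false, if_true]
                rfl
              · rw [Bool.not_eq_true] at h5
                by_cases h6 : (a :: rest).any (fun b => pvC6 (PySem.Str.lower b)) = true
                · obtain ⟨b, hb, hd⟩ := List.any_eq_true.mp h6
                  have hle : m ≤ 6 := (pv_best_le a rest 6).mpr ⟨b, hb, (pv_rank_le6 _).mpr (by simp [hd])⟩
                  have hgt : ¬ m ≤ 5 := by
                    intro hc
                    obtain ⟨b', hb', hr⟩ := (pv_best_le a rest 5).mp hc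
                    have hD := (pv_rank_le5 _).mp hr
                    have := List.any_eq_false.mp h0 b' hb'
                    have := List.any_eq_false.mp h1 b' hb'
                    have := List.any_eq_false.mp h2 b' hb'
                    have := List.any_eq_false.mp h3 b' hb'
                    have := List.any_eq_false.mp h4 b' hb'
                    have := List.any_eq_false.mp h5 b' hb'
                    simp_all
                  have hmv : m = 6 := by omega
                  simp only [h0, h1, h2, h3, h4, h5, h6, hmv, Bool.false_eq_true, if_false, if_true]
                  rfl
                · rw [Bool.not_eq_true] at h6
                  have hgt : ¬ m ≤ 6 := by
                    intro hc
                    obtain ⟨b', hb', hr⟩ := (pv_best_le a rest 6).mp hc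
                    have hD := (pv_rank_le6 _).mp hr
                    have := List.any_eq_false.mp h0 b' hb'
                    have := List.any_eq_false.mp h1 b' hb'
                    have := List.any_eq_false.mp h2 b' hb'
                    have := List.any_eq_false.mp h3 b' hb'
                    have := List.any_eq_false.mp h4 b' hb'
                    have := List.any_eq_false.mp h5 b' hb'
                    have := List.any_eq_false.mp h6 b' hb'
                    simp_all
                  have hmv : m = 7 := by omega
                  simp only [h0, h1, h2, h3, h4, h5, h6, hmv, Bool.false_eq_true, if_false]
                  rfl
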